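-- pv_equiv track=rewrite | github.com/Gamemode4Dev/GM4_Datapacks | gm4_auto_crafting/generate.py | update
-- ===== SOURCE A (Python) =====
-- def valid(key, value) -> bool:
--     """
--     check if value[key] exists
--     """
--     try:
--         value[key]
--         return True
--     except:
--         return False
--
-- def update(dict: dict, low: int, high: int) -> tuple[int, int]:
--     """
--     move low and high to values that exist in dict
--     """
--     lowest = False
--     highest = False
--     # check values greater than 'low'
--     while low < high and not lowest:
--         # check if there's a value at this point
--         if valid(low, dict):
--             lowest = True
--         else:
--             low += 1
--     # check values less than 'high'
--     while low < high and not highest: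
--         # check if there's a value at this point
--         if valid(high, dict):
--             highest = True
--         else:
--             high -= 1
--     return low, high
-- ===== SOURCE B (Python) =====
-- def update(dict, low, high):
--     """
--     move low and high to values that exist in dict
--     """
--     if low < high:
--         inner = [k for k in dict if low <= k < high]
--         low = min(inner) if inner else high
--         upper = [k for k in dict if low < k <= high]
--         high = max(upper) if upper else low
--     return low, high
-- ===== Notes on version B (the rewrite author's own statement) =====
-- stated objective: alternative
-- what changed: A scans the integer interval step by step testing key membership at each point; B instead takes the min of the dict keys lying in [low, high) (falling back to high) and then the max of the keys in (new_low, high] (falling back to new_low), trading the interval walk for two passes over the keys.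
import Mathlib
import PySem

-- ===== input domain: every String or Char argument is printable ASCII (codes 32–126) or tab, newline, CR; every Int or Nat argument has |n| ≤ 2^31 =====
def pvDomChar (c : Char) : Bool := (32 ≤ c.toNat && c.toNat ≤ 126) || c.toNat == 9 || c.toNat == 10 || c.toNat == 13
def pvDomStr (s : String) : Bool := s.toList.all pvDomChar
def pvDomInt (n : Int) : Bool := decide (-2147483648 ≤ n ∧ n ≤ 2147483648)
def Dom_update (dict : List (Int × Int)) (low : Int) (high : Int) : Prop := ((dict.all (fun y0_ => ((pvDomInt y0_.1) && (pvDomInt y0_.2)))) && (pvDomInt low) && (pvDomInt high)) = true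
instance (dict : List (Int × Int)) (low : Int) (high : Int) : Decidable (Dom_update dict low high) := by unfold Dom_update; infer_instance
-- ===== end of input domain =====

-- B replaces A's step-by-step scan over the integer interval [low, high] by two passes
-- over the dict's keys (min of the keys in [low, high), then max of the keys in (low', high]).

-- ===== PORT A =====
-- valid(key, value): value[key] exists (assoc-list first-match lookup, as Python dict lookup)
def valid (key : Int) (value : List (Int × Int)) : Bool := (value.lookup key).isSome

-- while low < high and not lowest: if valid(low, dict): lowest = True else low += 1
def updateLowLoop (dict : List (Int × Int)) (low high : Int) : Int :=
  if low < high then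
    if valid low dict then low else updateLowLoop dict (low + 1) high
  else low
termination_by (high - low).toNat
decreasing_by omega

-- while low < high and not highest: if valid(high, dict): highest = True else high -= 1
def updateHighLoop (dict : List (Int × Int)) (low high : Int) : Int :=
  if low < high then
    if valid high dict then high else updateHighLoop dict low (high - 1)
  else high
termination_by (high - low).toNat
decreasing_by omega

def update (dict : List (Int × Int)) (low : Int) (high : Int) : Int × Int :=
  let low' := updateLowLoop dict low high
  let high' := updateHighLoop dict low' high
  (low', high')

-- ===== PORT B =====
def update_alt (dict : List (Int × Int)) (low : Int) (high : Int) : Int × Int :=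
  if low < high then
    let inner := (dict.map Prod.fst).filter (fun k => decide (low ≤ k) && decide (k < high))
    let low' := match PySem.List.min? inner (fun x => x) with
      | some m => m
      | none => high
    let upper := (dict.map Prod.fst).filter (fun k => decide (low' < k) && decide (k ≤ high))
    let high' := match PySem.List.max? upper (fun x => x) with
      | some m => m
      | none => low'
    (low', high')
  else (low, high)

-- ===== PRECONDITION & SPEC =====
def Spec_update (dict : List (Int × Int)) (low : Int) (high : Int) (out : Int × Int) : Prop := out = update_alt dict low high
instance (dict : List (Int × Int)) (low : Int) (high : Int) (out : Int × Int) : Decidable (Spec_update dict low high out) := by unfold Spec_update; infer_instance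

-- ===== CLAIM (what is proved, stated in full; the proofs are below) =====
def Claim_equal_update : Prop := ∀ (dict : List (Int × Int)) (low : Int) (high : Int), Dom_update dict low high → Spec_update dict low high (update dict low high)

-- ===== LEMMAS AND PROOFS =====

theorem valid_iff_mem (key : Int) (d : List (Int × Int)) :
    valid key d = true ↔ key ∈ d.map Prod.fst := by
  induction d with
  | nil => simp [valid]
  | cons p t ih =>
    obtain ⟨k, v⟩ := p
    simp only [valid, List.lookup, List.map_cons, List.mem_cons] at *
    by_cases h : key = k
    · subst h; simp
    · simp [beq_eq_false_iff_ne.mpr h, ih, h]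

theorem lowLoop_spec (dict : List (Int × Int)) (low high : Int) (hle : low ≤ high) :
    updateLowLoop dict low high =
      (match PySem.List.min? ((dict.map Prod.fst).filter
          (fun k => decide (low ≤ k) && decide (k < high))) (fun x => x) with
        | some m => m
        | none => high) := by
  generalize hn : (high - low).toNat = n
  induction n generalizing low with
  | zero =>
    have hlh : low = high := by omega
    subst hlh
    rw [updateLowLoop]
    rw [if_neg (by omega)]
    have : (dict.map Prod.fst).filter (fun k => decide (low ≤ k) && decide (k < low)) = [] := by
      apply List.filter_eq_nil_iff.mpr
      intro x _
      simp only [Bool.and_eq_true, decide_eq_true_eq, not_and]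
      omega
    rw [this]
    simp [PySem.List.min?]
  | succ n ih =>
    have hlt : low < high := by omega
    rw [updateLowLoop, if_pos hlt]
    by_cases hv : valid low dict = true
    · rw [if_pos hv]
      have hmem : low ∈ (dict.map Prod.fst).filter
          (fun k => decide (low ≤ k) && decide (k < high)) := by
        rw [List.mem_filter]
        exact ⟨(valid_iff_mem low dict).mp hv, by simp; omega⟩
      cases hm : PySem.List.min? ((dict.map Prod.fst).filter
          (fun k => decide (low ≤ k) && decide (k < high))) (fun x => x) with
      | none =>
        exfalso
        rw [PySem.List.min?_eq_none_iff] at hm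
        rw [hm] at hmem
        exact absurd hmem (List.not_mem_nil)
      | some m =>
        have h1 : m ∈ (dict.map Prod.fst).filter
            (fun k => decide (low ≤ k) && decide (k < high)) := PySem.List.min?_mem hm
        have h2 := PySem.List.min?_isMin hm low hmem
        have h3 : low ≤ m := by
          have := (List.mem_filter.mp h1).2
          simp at this; omega
        show low = m
        omega
    · rw [if_neg hv]
      have hfil : (dict.map Prod.fst).filter (fun k => decide (low ≤ k) && decide (k < high)) =
          (dict.map Prod.fst).filter (fun k => decide (low + 1 ≤ k) && decide (k < high)) := by
        apply List.filter_congr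
        intro x hx
        have hne : x ≠ low := by
          intro h; subst h
          exact hv ((valid_iff_mem x dict).mpr hx)
        rw [show (decide (low ≤ x)) = decide (low + 1 ≤ x) from decide_eq_decide.mpr (by omega)]
      rw [hfil]
      exact ih (low + 1) (by omega) (by omega)

theorem highLoop_spec (dict : List (Int × Int)) (low high : Int) (hle : low ≤ high) :
    updateHighLoop dict low high =
      (match PySem.List.max? ((dict.map Prod.fst).filter
          (fun k => decide (low < k) && decide (k ≤ high))) (fun x => x) with
        | some m => m
        | none => low) := by
  generalize hn : (high - low).toNat = n
  induction n generalizing high with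
  | zero =>
    have hlh : low = high := by omega
    subst hlh
    rw [updateHighLoop]
    rw [if_neg (by omega)]
    have : (dict.map Prod.fst).filter (fun k => decide (low < k) && decide (k ≤ low)) = [] := by
      apply List.filter_eq_nil_iff.mpr
      intro x _
      simp only [Bool.and_eq_true, decide_eq_true_eq, not_and]
      omega
    rw [this]
    simp [PySem.List.max?]
  | succ n ih =>
    have hlt : low < high := by omega
    rw [updateHighLoop, if_pos hlt]
    by_cases hv : valid high dict = true
    · rw [if_pos hv]
      have hmem : high ∈ (dict.map Prod.fst).filter
          (fun k => decide (low < k) && decide (k ≤ high)) := by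
        rw [List.mem_filter]
        exact ⟨(valid_iff_mem high dict).mp hv, by simp; omega⟩
      cases hm : PySem.List.max? ((dict.map Prod.fst).filter
          (fun k => decide (low < k) && decide (k ≤ high))) (fun x => x) with
      | none =>
        exfalso
        rw [PySem.List.max?_eq_none_iff] at hm
        rw [hm] at hmem
        exact absurd hmem (List.not_mem_nil)
      | some m =>
        have h1 : m ∈ (dict.map Prod.fst).filter
            (fun k => decide (low < k) && decide (k ≤ high)) := PySem.List.max?_mem hm
        have h2 := PySem.List.max?_isMax hm high hmem
        have h3 : m ≤ high := by
          have := (List.mem_filter.mp h1).2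
          simp at this; omega
        show high = m
        omega
    · rw [if_neg hv]
      have hfil : (dict.map Prod.fst).filter (fun k => decide (low < k) && decide (k ≤ high)) =
          (dict.map Prod.fst).filter (fun k => decide (low < k) && decide (k ≤ high - 1)) := by
        apply List.filter_congr
        intro x hx
        have hne : x ≠ high := by
          intro h; subst h
          exact hv ((valid_iff_mem x dict).mpr hx)
        rw [show (decide (x ≤ high)) = decide (x ≤ high - 1) from decide_eq_decide.mpr (by omega)]
      rw [hfil]
      exact ih (high - 1) (by omega) (by omega)

theorem lowLoop_bounds (dict : List (Int × Int)) (low high : Int) (hle : low ≤ high) :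
    low ≤ updateLowLoop dict low high ∧ updateLowLoop dict low high ≤ high := by
  rw [lowLoop_spec dict low high hle]
  cases hm : PySem.List.min? ((dict.map Prod.fst).filter
      (fun k => decide (low ≤ k) && decide (k < high))) (fun x => x) with
  | none => simp; omega
  | some m =>
    have h1 := PySem.List.min?_mem hm
    have := (List.mem_filter.mp h1).2
    simp at this
    simp only []
    omega

-- ===== VERDICT (by name: the statement is the Claim_ definition above) =====
theorem update_spec : Claim_equal_update := by
  intro dict low high _
  unfold Spec_update update update_alt
  by_cases hlt : low < high
  · rw [if_pos hlt]
    simp only []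
    have hlow := lowLoop_spec dict low high (by omega)
    have hb := lowLoop_bounds dict low high (by omega)
    rw [hlow] at hb ⊢
    rw [highLoop_spec dict _ high hb.2]
  · rw [if_neg hlt]
    have h1 : updateLowLoop dict low high = low := by rw [updateLowLoop, if_neg hlt]
    have h2 : updateHighLoop dict low high = high := by rw [updateHighLoop, if_neg hlt]
    simp only [h1, h2]
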